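-- pv_equiv track=rewrite | github.com/yongjae5717/TIL | Programers/level2/더 맵게.py | solution
-- ===== SOURCE A (Python) =====
-- import heapq
--
-- def solution(scoville, K):
--     heap = list()
--     for i in scoville:
--         heapq.heappush(heap, i)
--
--     answer = 0
--     while heap:
--         x = heapq.heappop(heap)
--         if x >= K:
--             heapq.heappush(heap, x)
--             return answer
--         answer += 1
--         if heap:
--             y = heapq.heappop(heap)
--             temp = x + y * 2
--             heapq.heappush(heap, temp)
--         else:
--             return -1
--     return -1
-- ===== SOURCE B (Python) =====
-- def solution(scoville, K):
--     foods = list(scoville)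
--     count = 0
--     while True:
--         if not foods:
--             return -1
--         m = min(foods)
--         if m >= K:
--             return count
--         foods.remove(m)
--         if not foods:
--             return -1
--         m2 = min(foods)
--         foods.remove(m2)
--         foods.append(m + 2 * m2)
--         count += 1
-- ===== Notes on version B (the rewrite author's own statement) =====
-- stated objective: alternative
-- what changed: Replaces the binary heap (heapq push/pop) by a plain list with a linear scan for the minimum each round: remove the two smallest, append x + 2*y, count the mixes.
import Mathlib
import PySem

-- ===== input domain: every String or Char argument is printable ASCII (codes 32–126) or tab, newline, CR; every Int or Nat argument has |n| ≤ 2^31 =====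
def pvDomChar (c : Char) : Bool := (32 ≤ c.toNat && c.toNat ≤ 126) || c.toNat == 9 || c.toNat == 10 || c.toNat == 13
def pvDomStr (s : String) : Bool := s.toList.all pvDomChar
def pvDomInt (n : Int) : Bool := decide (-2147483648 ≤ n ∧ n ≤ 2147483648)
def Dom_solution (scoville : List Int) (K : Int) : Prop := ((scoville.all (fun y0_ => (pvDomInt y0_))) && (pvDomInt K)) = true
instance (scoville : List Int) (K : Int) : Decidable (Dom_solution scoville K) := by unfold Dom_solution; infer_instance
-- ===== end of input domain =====

-- B replaces A's binary heap by a plain list with a linear min-scan per round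
-- (different data structure, same exact results; no speed claim).

-- ===== PORT A =====
-- heapq.heappush / heapq.heappop are library calls, ported as the corresponding
-- priority-queue operations on a sorted list (insert in order / pop the head):
-- heappop returns the minimum element, exactly as heapq does on Int values.
def heapPush (heap : List Int) (item : Int) : List Int :=
  List.orderedInsert (· ≤ ·) item heap

-- the `while heap:` loop of A (the re-push of x before `return answer` has no
-- effect on the returned value and is dropped)
def popLoopA (K : Int) (answer : Int) (heap : List Int) : Int :=
  match heap with
  | [] => -1                                   -- while-loop exits, final `return -1`
  | x :: rest =>                               -- x = heappop(heap)
    if x ≥ K then answer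
    else
      match rest with
      | [] => -1                               -- `else: return -1`
      | y :: rest2 =>                          -- y = heappop(heap)
          popLoopA K (answer + 1) (heapPush rest2 (x + y * 2))
termination_by heap.length
decreasing_by simp [heapPush, List.orderedInsert_length]

def solution (scoville : List Int) (K : Int) : Int :=
  popLoopA K 0 (scoville.foldl heapPush [])

-- ===== PORT B =====
-- the `while True:` loop of Source B; the Nat argument is fuel making the recursion
-- structural (foods.length + 1 always suffices: each round shortens foods by one)
def mixGo : Nat → Int → Int → List Int → Int
  | 0, _, _, _ => -1                           -- fuel exhausted (never reached)
  | fuel + 1, K, count, foods =>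
    match foods with
    | [] => -1                                 -- `if not foods: return -1`
    | x :: t =>
      let m := t.foldl min x                   -- m = min(foods)
      if m ≥ K then count
      else
        match PySem.List.remove? (x :: t) m with
        | none => -1                           -- unreachable: the minimum is in foods
        | some rest =>
          match rest with
          | [] => -1                           -- `if not foods: return -1`
          | y :: u =>
            let m2 := u.foldl min y            -- m2 = min(foods)
            match PySem.List.remove? (y :: u) m2 with
            | none => -1                       -- unreachable
            | some rest2 => mixGo fuel K (count + 1) (rest2 ++ [m + 2 * m2])

def solution_alt (scoville : List Int) (K : Int) : Int :=
  mixGo (scoville.length + 1) K 0 scoville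

-- ===== PRECONDITION & SPEC =====
def Spec_solution (scoville : List Int) (K : Int) (out : Int) : Prop := out = solution_alt scoville K
instance (scoville : List Int) (K : Int) (out : Int) : Decidable (Spec_solution scoville K out) := by unfold Spec_solution; infer_instance

-- ===== CLAIM (what is proved, stated in full; the proofs are below) =====
def Claim_equal_solution : Prop := ∀ (scoville : List Int) (K : Int), Dom_solution scoville K → Spec_solution scoville K (solution scoville K)

-- ===== LEMMAS AND PROOFS =====

-- Python min(x::t) is the fold; Lean's List.min? is literally that fold.
theorem min?_cons_foldl (x : Int) (t : List Int) :
    (x :: t).min? = some (t.foldl min x) := rfl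

-- the minimum value is invariant under permutation
theorem min?_perm {l l' : List Int} (p : l.Perm l') : l.min? = l'.min? := by
  cases hl : l.min? with
  | none =>
    rw [List.min?_eq_none_iff] at hl; subst hl
    rw [p.symm.eq_nil]; rfl
  | some m =>
    rw [List.min?_eq_some_iff] at hl
    symm; rw [List.min?_eq_some_iff]
    exact ⟨p.mem_iff.mp hl.1, fun b hb => hl.2 b (p.mem_iff.mpr hb)⟩

-- B's loop depends only on the multiset of foods
theorem mixGo_perm (K : Int) :
    ∀ (fuel : ℕ) (c : Int) (l l' : List Int), l.length < fuel → l.Perm l' →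
      mixGo fuel K c l = mixGo fuel K c l' := by
  intro fuel
  induction fuel with
  | zero => intro c l l' hn _; omega
  | succ fuel ih =>
    intro c l l' hn p
    match l, l' with
    | [], l' => rw [p.symm.eq_nil]
    | x :: t, [] => exact absurd p.eq_nil (by simp)
    | x :: t, x' :: t' =>
      simp only [mixGo]
      have hmin : (t.foldl min x) = (t'.foldl min x') := by
        have := min?_perm p
        rw [min?_cons_foldl, min?_cons_foldl] at this
        exact Option.some.inj this
      rw [← hmin]
      set m := t.foldl min x with hm
      by_cases hK : m ≥ K
      · simp [hK]
      · simp only [hK, if_false]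
        have hmem : m ∈ x :: t :=
          (List.min?_eq_some_iff.mp (min?_cons_foldl x t)).1
        have hmem' : m ∈ x' :: t' := p.mem_iff.mp hmem
        rw [PySem.List.remove?_eq_some_erase _ m hmem,
            PySem.List.remove?_eq_some_erase _ m hmem']
        have perase : ((x :: t).erase m).Perm ((x' :: t').erase m) := p.erase m
        have hlen1 : ((x :: t).erase m).length = t.length :=
          by simp [List.length_erase_of_mem hmem]
        match hrest : (x :: t).erase m, hrest' : (x' :: t').erase m with
        | [], l2 =>
          rw [hrest, hrest'] at perase
          rw [perase.symm.eq_nil]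
        | y :: u, [] =>
          rw [hrest, hrest'] at perase
          exact absurd perase.eq_nil (by simp)
        | y :: u, y' :: u' =>
          rw [hrest, hrest'] at perase
          have hmin2 : (u.foldl min y) = (u'.foldl min y') := by
            have := min?_perm perase
            rw [min?_cons_foldl, min?_cons_foldl] at this
            exact Option.some.inj this
          simp only []
          rw [← hmin2]
          set m2 := u.foldl min y with hm2
          have hmem2 : m2 ∈ y :: u :=
            (List.min?_eq_some_iff.mp (min?_cons_foldl y u)).1
          have hmem2' : m2 ∈ y' :: u' := perase.mem_iff.mp hmem2
          rw [PySem.List.remove?_eq_some_erase _ m2 hmem2,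
              PySem.List.remove?_eq_some_erase _ m2 hmem2']
          apply ih
          · have hlen2 : ((y :: u).erase m2).length = u.length :=
              by simp [List.length_erase_of_mem hmem2]
            rw [hrest] at hlen1
            simp at hlen1 hlen2 hn ⊢
            omega
          · exact (perase.erase m2).append_right _

-- on a sorted list, A's heap loop and B's min-scan loop coincide
theorem loopA_eq_mixGo (K : Int) :
    ∀ (fuel : ℕ) (c : Int) (l : List Int), l.length < fuel → l.Pairwise (· ≤ ·) →
      popLoopA K c l = mixGo fuel K c l := by
  intro fuel
  induction fuel with
  | zero => intro c l hn _; omega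
  | succ fuel ih =>
    intro c l hn hs
    match l with
    | [] => simp [popLoopA.eq_def, mixGo]
    | x :: t =>
      rw [popLoopA.eq_def]
      simp only [mixGo]
      -- on a sorted list the head is the minimum
      have head_min : ∀ (a : Int) (s : List Int), (a :: s).Pairwise (· ≤ ·) →
          s.foldl min a = a := by
        intro a s hso
        have ha : (a :: s).min? = some a := by
          rw [List.min?_eq_some_iff]
          refine ⟨List.mem_cons_self, ?_⟩
          intro b hb
          rcases List.mem_cons.mp hb with hb | hb
          · exact le_of_eq hb.symm
          · exact List.rel_of_pairwise_cons hso hb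
        rw [min?_cons_foldl] at ha
        exact Option.some.inj ha
      rw [head_min x t hs]
      by_cases hK : x ≥ K
      · simp [hK]
      · simp only [hK, if_false]
        rw [PySem.List.remove?_cons_self]
        simp only []
        match t with
        | [] => rfl
        | y :: u =>
          have hst : (y :: u).Pairwise (· ≤ ·) := hs.of_cons
          simp only []
          rw [head_min y u hst, PySem.List.remove?_cons_self]
          simp only []
          have harith : x + y * 2 = x + 2 * y := by ring
          rw [harith]
          have hsu : u.Pairwise (· ≤ ·) := hst.of_cons
          have hsi : (List.orderedInsert (· ≤ ·) (x + 2 * y) u).Pairwise (· ≤ ·) :=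
            List.Pairwise.orderedInsert _ _ hsu
          have hlen : (List.orderedInsert (· ≤ ·) (x + 2 * y) u).length < fuel := by
            rw [List.orderedInsert_length]
            simp at hn; omega
          calc popLoopA K (c + 1) (heapPush u (x + 2 * y))
              = mixGo fuel K (c + 1) (List.orderedInsert (· ≤ ·) (x + 2 * y) u) :=
                ih (c + 1) _ hlen hsi
            _ = mixGo fuel K (c + 1) (u ++ [x + 2 * y]) := by
                apply mixGo_perm K fuel (c + 1) _ _ hlen
                exact (List.perm_orderedInsert _ _ _).trans
                  (List.perm_append_singleton _ _).symm

-- building A's heap by repeated pushes yields a sorted permutation of the input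
theorem buildHeap_sorted_perm :
    ∀ (l acc : List Int), acc.Pairwise (· ≤ ·) →
      (l.foldl heapPush acc).Pairwise (· ≤ ·) ∧ (l.foldl heapPush acc).Perm (acc ++ l) := by
  intro l
  induction l with
  | nil => intro acc hacc; exact ⟨hacc, by simp⟩
  | cons a l ih =>
    intro acc hacc
    have hacc' : (heapPush acc a).Pairwise (· ≤ ·) :=
      List.Pairwise.orderedInsert _ _ hacc
    obtain ⟨hs, hp⟩ := ih (heapPush acc a) hacc'
    refine ⟨hs, hp.trans ?_⟩
    refine ((List.perm_orderedInsert _ _ _).append_right l).trans ?_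
    exact List.perm_middle.symm

-- ===== VERDICT (by name: the statement is the Claim_ definition above) =====
theorem solution_spec : Claim_equal_solution := by
  intro scoville K _
  unfold Spec_solution solution solution_alt
  obtain ⟨hs, hp⟩ := buildHeap_sorted_perm scoville [] (by simp)
  simp only [List.nil_append] at hp
  have hlen : (scoville.foldl heapPush []).length = scoville.length := hp.length_eq
  rw [loopA_eq_mixGo K (scoville.length + 1) 0 _ (by omega) hs]
  exact mixGo_perm K (scoville.length + 1) 0 _ _ (by omega) hp
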